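-- pv_equiv track=rewrite | github.com/esfinkel/4701-music-generation-ai | music_helpers.py | get_cannonical_note_idx
-- ===== SOURCE A (Python) =====
-- CANNONICAL_NOTES = ["c", "c#", "d", "d#", "e", "f", "f#", "g", "g#",
--                     "a", "a#", "b"]
--
-- def get_note_register(note):
--   """ Returns the register of a note, where register 0 is
--   c...b, register -1 is C...B, register 1 is cc...bb, etc."""
--   ## indicates whether we should climb or drop octaves upon
--   ## encountering repeats
--   pitch_up = (note[0] == note[0].lower())
--   register = 0 if pitch_up else -1
--   base_note = note[0]
--   for i in range(1,len(note)):
--     if note[i] != base_note: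
--       break
--     register += 1 if pitch_up else -1
--   return register
--
-- def get_cannonical_note_idx(note):
--   """Returns the index of the cannonical note to `note`,
--   in register 0. Also returns the true register of `note`. """
--   if "#" not in note and "-" not in note:
--     return CANNONICAL_NOTES.index(note.lower()[0]), len(note) - 1 if not note.isupper() else len(note) * -1
--
--   register = get_note_register(note)
--   idx = CANNONICAL_NOTES.index(note[0].lower())
--   start = min(note.index("#") if "#" in note else len(note),
--               note.index("-") if "-" in note else len(note))
--   for i in range(start, len(note)):
--     assert note[i] == "#" or note[i] == "-", note[i]
--     if note[i] == "#":
--       if idx + 1 >= len(CANNONICAL_NOTES):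
--         register += 1
--       idx = (idx + 1) % len(CANNONICAL_NOTES)
--     else:
--       if idx - 1 < 0:
--         register -= 1
--       idx = (idx - 1) % len(CANNONICAL_NOTES)
--   return idx, register
-- ===== SOURCE B (Python) =====
-- CANNONICAL_NOTES = ["c", "c#", "d", "d#", "e", "f", "f#", "g", "g#",
--                     "a", "a#", "b"]
--
-- def get_note_register(note):
--   pitch_up = (note[0] == note[0].lower())
--   register = 0 if pitch_up else -1
--   base_note = note[0]
--   for i in range(1,len(note)):
--     if note[i] != base_note:
--       break
--     register += 1 if pitch_up else -1
--   return register
--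
-- def get_cannonical_note_idx(note):
--   """Closed-form accidental handling: instead of stepping through the
--   accidentals one by one with modular wrap-arounds, add up their net
--   effect and split it into index and octave carry arithmetically."""
--   if "#" not in note and "-" not in note:
--     return CANNONICAL_NOTES.index(note.lower()[0]), len(note) - 1 if not note.isupper() else len(note) * -1
--
--   base = CANNONICAL_NOTES.index(note[0].lower())
--   register0 = get_note_register(note)
--   total = base + note.count("#") - note.count("-")
--   return total % 12, register0 + total // 12
-- ===== Notes on version B (the rewrite author's own statement) =====
-- stated objective: simpler
-- what changed: The per-character stepping loop over the sharp/flat marks, with its modular index update and octave carry bookkeeping, is replaced by a closed form: the net mark count is added to the base index once and a single mod/floordiv splits the total into canonical index and octave.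
import Mathlib
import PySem

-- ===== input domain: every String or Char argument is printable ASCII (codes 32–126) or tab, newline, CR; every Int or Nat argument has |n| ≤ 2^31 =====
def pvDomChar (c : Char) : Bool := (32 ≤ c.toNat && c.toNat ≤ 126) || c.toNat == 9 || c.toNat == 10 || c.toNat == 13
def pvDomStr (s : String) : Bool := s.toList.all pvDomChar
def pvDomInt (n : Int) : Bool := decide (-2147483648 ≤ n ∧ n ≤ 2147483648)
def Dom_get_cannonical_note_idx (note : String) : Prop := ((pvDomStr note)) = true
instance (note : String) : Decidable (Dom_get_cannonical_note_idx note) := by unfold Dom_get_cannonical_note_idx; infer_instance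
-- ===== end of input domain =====

-- B replaces A's per-character mark-stepping loop by a closed-form computation
-- (net sharp/flat count, then one mod/floordiv); same return value.

-- ===== PORT A =====
def pvNotes : List String := ["c", "c#", "d", "d#", "e", "f", "f#", "g", "g#", "a", "a#", "b"]

-- CANNONICAL_NOTES.index(<one-char string>); none = ValueError (excluded by Pre_), defaulted to 0
def pvNoteIdx (c : Char) : Int :=
  (((PySem.List.index? pvNotes (String.mk [c])).getD 0 : Nat) : Int)

-- note.isupper(): at least one cased character and no lowercase one (exact on the ASCII domain)
def pvIsUpper (l : List Char) : Bool :=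
  (l.any fun c => PySem.Chars.isupper c || PySem.Chars.islower c) &&
    (l.all fun c => !PySem.Chars.islower c)

-- the 'for i in range(1, len(note)): if note[i] != base_note: break; register += step' loop
def pvRegLoop (base : Char) (step : Int) : List Char → Int → Int
  | [], r => r
  | c :: rest, r => if c ≠ base then r else pvRegLoop base step rest (r + step)

def get_note_register (l : List Char) : Int :=
  match l with
  | [] => 0   -- note[0] raises IndexError in Python; unreachable under Pre_
  | c0 :: rest =>
    let pitch_up := c0 = PySem.Chars.lowerChar c0
    pvRegLoop c0 (if pitch_up then 1 else -1) rest (if pitch_up then 0 else -1)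

-- body of A's accidental loop; a character that is neither '#' nor '-' raises
-- AssertionError in Python (excluded by Pre_), here it falls into the else branch
def pvStep (st : Int × Int) (c : Char) : Int × Int :=
  if c = '#' then
    (PySem.Int.mod (st.1 + 1) (pvNotes.length : Int), if st.1 + 1 ≥ (pvNotes.length : Int) then st.2 + 1 else st.2)
  else
    (PySem.Int.mod (st.1 - 1) (pvNotes.length : Int), if st.1 - 1 < 0 then st.2 - 1 else st.2)

def get_cannonical_note_idx (note : String) : Int × Int :=
  let l := note.toList
  if !(PySem.Chars.isIn ['#'] l) && !(PySem.Chars.isIn ['-'] l) then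
    (pvNoteIdx ((PySem.Chars.lower l).headD ' '),
     if !(pvIsUpper l) then (l.length : Int) - 1 else (l.length : Int) * (-1))
  else
    let register := get_note_register l
    let idx := pvNoteIdx (PySem.Chars.lowerChar (l.headD ' '))
    let start : Int :=
      min (if PySem.Chars.isIn ['#'] l then PySem.Chars.find l ['#'] else (l.length : Int))
          (if PySem.Chars.isIn ['-'] l then PySem.Chars.find l ['-'] else (l.length : Int))
    (PySem.List.pyRange start (l.length : Int) 1).foldl
      (fun st i => pvStep st (PySem.List.pyGetD l i ' ')) (idx, register)

-- ===== PORT B =====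
def get_cannonical_note_idx_alt (note : String) : Int × Int :=
  let l := note.toList
  if !(PySem.Chars.isIn ['#'] l) && !(PySem.Chars.isIn ['-'] l) then
    (pvNoteIdx ((PySem.Chars.lower l).headD ' '),
     if !(pvIsUpper l) then (l.length : Int) - 1 else (l.length : Int) * (-1))
  else
    let base := pvNoteIdx (PySem.Chars.lowerChar (l.headD ' '))
    let register0 := get_note_register l
    let total := base + (PySem.Chars.count l ['#'] : Int) - (PySem.Chars.count l ['-'] : Int)
    (PySem.Int.mod total 12, register0 + PySem.Int.floordiv total 12)

-- ===== PRECONDITION & SPEC =====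
-- Pre_ = exactly the inputs on which A returns: a nonempty note whose first letter names a
-- natural note (a..g, either case), and in which, once a sharp or flat mark appears, every
-- later character is such a mark; on all other inputs A raises an exception.
def Pre_get_cannonical_note_idx (note : String) : Prop :=
  note.toList ≠ [] ∧
  PySem.Chars.lowerChar (note.toList.headD ' ') ∈ ['a', 'b', 'c', 'd', 'e', 'f', 'g'] ∧
  ((note.toList.dropWhile (fun c => !(c == '#' || c == '-'))).all
      (fun c => c == '#' || c == '-')) = true
instance (note : String) : Decidable (Pre_get_cannonical_note_idx note) := by
  unfold Pre_get_cannonical_note_idx; infer_instance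

def pvWitness_get_cannonical_note_idx : String := "c"

def Spec_get_cannonical_note_idx (note : String) (out : Int × Int) : Prop :=
  out = get_cannonical_note_idx_alt note
instance (note : String) (out : Int × Int) : Decidable (Spec_get_cannonical_note_idx note out) := by
  unfold Spec_get_cannonical_note_idx; infer_instance

-- ===== CLAIM (what is proved, stated in full; the proofs are below) =====
def Claim_equal_get_cannonical_note_idx : Prop :=
  ∀ (note : String), Dom_get_cannonical_note_idx note → Pre_get_cannonical_note_idx note →
    Spec_get_cannonical_note_idx note (get_cannonical_note_idx note)

-- ===== LEMMAS AND PROOFS =====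

lemma pv_count_go_singleton (c : Char) (l : List Char) (fuel acc : Nat) (h : l.length ≤ fuel) :
    PySem.Chars.count.go [c] fuel l acc = acc + l.count c := by
  induction l generalizing fuel acc with
  | nil => cases fuel <;> simp [PySem.Chars.count.go]
  | cons x t ih =>
    cases fuel with
    | zero => simp at h
    | succ n =>
      simp only [List.length_cons, Nat.add_le_add_iff_right] at h
      by_cases hx : x = c
      · subst hx
        rw [show PySem.Chars.count.go [x] (n+1) (x :: t) acc
              = PySem.Chars.count.go [x] n t (acc + 1) by
            simp [PySem.Chars.count.go, List.isPrefixOf]]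
        rw [ih n (acc + 1) h]
        simp [List.count_cons]
        omega
      · rw [show PySem.Chars.count.go [c] (n+1) (x :: t) acc
              = PySem.Chars.count.go [c] n t acc by
            simp [PySem.Chars.count.go, List.isPrefixOf, Ne.symm hx]]
        rw [ih n acc h]
        simp [List.count_cons, hx]

lemma pv_count_singleton (l : List Char) (c : Char) :
    PySem.Chars.count l [c] = l.count c := by
  simp [PySem.Chars.count]
  rw [pv_count_go_singleton c l l.length 0 le_rfl]
  omega

lemma pv_singleton_prefix (c : Char) (l : List Char) : [c] <+: l ↔ l.head? = some c := by
  cases l with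
  | nil => simp
  | cons x t =>
    constructor
    · intro h
      rcases (List.cons_prefix_cons.mp h) with ⟨h1, _⟩
      simp [h1]
    · intro h
      simp at h
      subst h
      exact List.cons_prefix_cons.mpr ⟨rfl, List.nil_prefix⟩

lemma pv_head_dropWhile (p : Char → Bool) (l : List Char) (c : Char)
    (h : (l.dropWhile p).head? = some c) : p c = false := by
  induction l with
  | nil => simp [List.dropWhile] at h
  | cons x t ih =>
    rw [List.dropWhile_cons] at h
    split at h
    · exact ih h
    · simp at h
      subst h
      simp_all

lemma pv_find_singleton_eq (pre suf : List Char) (c : Char)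
    (hpre : c ∉ pre) (hhd : suf.head? = some c) :
    PySem.Chars.find (pre ++ suf) [c] = (pre.length : Int) := by
  have hmem : c ∈ pre ++ suf := by
    cases suf with
    | nil => simp at hhd
    | cons y t => simp at hhd; subst hhd; simp
  have hnn : 0 ≤ PySem.Chars.find (pre ++ suf) [c] :=
    (PySem.Chars.find_nonneg_iff _ _).mpr ((List.singleton_infix_iff c _).mpr hmem)
  obtain ⟨hpref, hmin⟩ := PySem.Chars.find_spec hnn
  set k := (PySem.Chars.find (pre ++ suf) [c]).toNat with hk
  have hat : [c] <+: (pre ++ suf).drop pre.length := by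
    rw [List.drop_left]
    exact (pv_singleton_prefix c suf).mpr hhd
  have hk_le : k ≤ pre.length := by
    by_contra hlt
    exact (hmin pre.length (by omega)) hat
  have hk_ge : pre.length ≤ k := by
    by_contra hlt
    push_neg at hlt
    have := (pv_singleton_prefix c _).mp hpref
    have : c ∈ pre := by
      have h1 : ((pre ++ suf).drop k).head? = some c := (pv_singleton_prefix c _).mp hpref
      have h2 : ((pre ++ suf).drop k)[0]? = some c := by
        rwa [← List.head?_eq_getElem?]
      rw [List.getElem?_drop] at h2
      have h3 : (pre ++ suf)[k + 0]? = pre[k + 0]? := by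
        rw [List.getElem?_append_left (by omega)]
      rw [h3] at h2
      exact List.mem_of_getElem? h2
    exact hpre this
  omega

lemma pv_find_singleton_ge (pre suf : List Char) (c : Char) (hpre : c ∉ pre)
    (hin : PySem.Chars.isIn [c] (pre ++ suf) = true) :
    (pre.length : Int) ≤ PySem.Chars.find (pre ++ suf) [c] := by
  have hnn : 0 ≤ PySem.Chars.find (pre ++ suf) [c] :=
    (PySem.Chars.find_nonneg_iff _ _).mpr ((PySem.Chars.isIn_iff_infix _ _).mp hin)
  obtain ⟨hpref, hmin⟩ := PySem.Chars.find_spec hnn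
  set k := (PySem.Chars.find (pre ++ suf) [c]).toNat with hk
  by_contra hlt
  push_neg at hlt
  have hklt : k < pre.length := by omega
  have h1 : ((pre ++ suf).drop k).head? = some c := (pv_singleton_prefix c _).mp hpref
  have h2 : ((pre ++ suf).drop k)[0]? = some c := by rwa [← List.head?_eq_getElem?]
  rw [List.getElem?_drop] at h2
  have h3 : (pre ++ suf)[k + 0]? = pre[k + 0]? := by
    rw [List.getElem?_append_left (by omega)]
  rw [h3] at h2
  exact hpre (List.mem_of_getElem? h2)

-- closed form of A's accidental loop
lemma pv_mod12 (a : Int) : PySem.Int.mod a 12 = a % 12 := by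
  simp [PySem.Int.mod, Int.fmod_eq_emod]

lemma pv_fdiv12 (a : Int) : PySem.Int.floordiv a 12 = a / 12 := by
  simp [PySem.Int.floordiv, Int.fdiv_eq_ediv]

lemma pv_fold_step (suf : List Char) : ∀ (idx reg : Int), 0 ≤ idx → idx < 12 →
    (∀ c ∈ suf, c = '#' ∨ c = '-') →
    suf.foldl pvStep (idx, reg) =
      (PySem.Int.mod (idx + ((suf.count '#' : Int) - (suf.count '-' : Int))) 12,
       reg + PySem.Int.floordiv (idx + ((suf.count '#' : Int) - (suf.count '-' : Int))) 12) := by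
  induction suf with
  | nil =>
    intro idx reg h0 h12 _
    simp [pv_mod12, pv_fdiv12]
    constructor
    · omega
    · omega
  | cons c t ih =>
    intro idx reg h0 h12 hall
    have hc := hall c (by simp)
    have hall' : ∀ x ∈ t, x = '#' ∨ x = '-' := fun x hx => hall x (by simp [hx])
    rcases hc with hc | hc
    · subst hc
      rw [List.foldl_cons]
      have hstep : pvStep (idx, reg) '#' =
          (PySem.Int.mod (idx + 1) 12, if idx + 1 ≥ 12 then reg + 1 else reg) := by
        simp [pvStep, pvNotes]
      rw [hstep]
      have hb0 : 0 ≤ PySem.Int.mod (idx + 1) 12 := by rw [pv_mod12]; omega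
      have hb12 : PySem.Int.mod (idx + 1) 12 < 12 := by rw [pv_mod12]; omega
      rw [ih _ _ hb0 hb12 hall']
      rw [show ((('#'::t).count '#' : Int)) = ((t.count '#' : Int)) + 1 by
            simp [List.count_cons],
          show ((('#'::t).count '-' : Int)) = ((t.count '-' : Int)) by
            simp [List.count_cons]]
      simp only [pv_mod12, pv_fdiv12, Prod.mk.injEq]
      constructor
      · first | (split_ifs <;> omega) | omega
      · first | (split_ifs <;> omega) | omega
    · subst hc
      rw [List.foldl_cons]
      have hstep : pvStep (idx, reg) '-' =
          (PySem.Int.mod (idx - 1) 12, if idx - 1 < 0 then reg - 1 else reg) := by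
        simp [pvStep, pvNotes]
      rw [hstep]
      have hb0 : 0 ≤ PySem.Int.mod (idx - 1) 12 := by rw [pv_mod12]; omega
      have hb12 : PySem.Int.mod (idx - 1) 12 < 12 := by rw [pv_mod12]; omega
      rw [ih _ _ hb0 hb12 hall']
      rw [show ((('-'::t).count '#' : Int)) = ((t.count '#' : Int)) by
            simp [List.count_cons],
          show ((('-'::t).count '-' : Int)) = ((t.count '-' : Int)) + 1 by
            simp [List.count_cons]]
      simp only [pv_mod12, pv_fdiv12, Prod.mk.injEq]
      constructor
      · first | (split_ifs <;> omega) | omega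
      · first | (split_ifs <;> omega) | omega

lemma pv_noteIdx_bounds (c : Char) (h : c ∈ ['a', 'b', 'c', 'd', 'e', 'f', 'g']) :
    0 ≤ pvNoteIdx c ∧ pvNoteIdx c < 12 := by
  fin_cases h <;> decide

lemma pv_suf_all (l : List Char)
    (hall : ((l.dropWhile (fun c => !(c == '#' || c == '-'))).all
      (fun c => c == '#' || c == '-')) = true) :
    ∀ c ∈ l.dropWhile (fun c => !(c == '#' || c == '-')), c = '#' ∨ c = '-' := by
  intro c hc
  have := List.all_eq_true.mp hall c hc
  simpa using this

-- ===== VERDICT (by name: the statement is the Claim_ definition above) =====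
theorem get_cannonical_note_idx_spec : Claim_equal_get_cannonical_note_idx := by
  intro note _ hpre
  obtain ⟨hne, hmem, hall⟩ := hpre
  unfold Spec_get_cannonical_note_idx
  unfold get_cannonical_note_idx get_cannonical_note_idx_alt
  set l := note.toList with hl
  by_cases hcond : (!(PySem.Chars.isIn ['#'] l) && !(PySem.Chars.isIn ['-'] l)) = true
  · rw [if_pos hcond, if_pos hcond]
  · rw [if_neg hcond, if_neg hcond]
    dsimp only
    have hin : PySem.Chars.isIn ['#'] l = true ∨ PySem.Chars.isIn ['-'] l = true := by
      rcases h1 : PySem.Chars.isIn ['#'] l <;> rcases h2 : PySem.Chars.isIn ['-'] l <;>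
        simp_all
    set p : Char → Bool := fun c => !(c == '#' || c == '-') with hp
    set pre := l.takeWhile p with hpre'
    set suf := l.dropWhile p with hsuf'
    have hsplit : pre ++ suf = l := List.takeWhile_append_dropWhile
    have hpre_no : ∀ x ∈ pre, x ≠ '#' ∧ x ≠ '-' := by
      intro x hx
      have := List.mem_takeWhile_imp hx
      rw [hp] at this
      constructor <;> (intro h; subst h; simp at this)
    have hsuf_ne : suf ≠ [] := by
      intro hnil
      have hleq : l = pre := by rw [← hsplit, hnil, List.append_nil]
      rcases hin with h | h
      · have : '#' ∈ l := (List.singleton_infix_iff _ _).mp ((PySem.Chars.isIn_iff_infix _ _).mp h)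
        exact (hpre_no '#' (hleq ▸ this)).1 rfl
      · have : '-' ∈ l := (List.singleton_infix_iff _ _).mp ((PySem.Chars.isIn_iff_infix _ _).mp h)
        exact (hpre_no '-' (hleq ▸ this)).2 rfl
    have hc0 : suf.head? = some (suf.head hsuf_ne) := List.head?_eq_head hsuf_ne
    set c0 := suf.head hsuf_ne with hc0def
    have hc0acc : c0 = '#' ∨ c0 = '-' := by
      have := pv_head_dropWhile p l c0 hc0
      rw [hp] at this
      simp only [Bool.not_eq_false', Bool.or_eq_true, beq_iff_eq] at this
      exact this
    have hc0mem : c0 ∈ l := by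
      rw [← hsplit]
      exact List.mem_append_right pre (List.mem_of_mem_head? (by rw [hc0]; simp))
    have hc0notpre : c0 ∉ pre := by
      intro hx
      rcases hc0acc with h | h
      · exact (hpre_no c0 hx).1 h
      · exact (hpre_no c0 hx).2 h
    -- the `start` of A's loop is the length of the accidental-free prefix
    have hstart :
        min (if PySem.Chars.isIn ['#'] l then PySem.Chars.find l ['#'] else (l.length : Int))
            (if PySem.Chars.isIn ['-'] l then PySem.Chars.find l ['-'] else (l.length : Int))
          = (pre.length : Int) := by
      have hlen : (pre.length : Int) ≤ (l.length : Int) := by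
        rw [← hsplit]; simp
      have harm : ∀ c : Char, (∀ x ∈ pre, x ≠ c) →
          (pre.length : Int) ≤
            (if PySem.Chars.isIn [c] l then PySem.Chars.find l [c] else (l.length : Int)) := by
        intro c hc
        split
        · rw [← hsplit]
          exact pv_find_singleton_ge pre suf c (fun hx => (hc c hx) rfl) (by rwa [hsplit])
        · exact hlen
      have heq : ∀ c : Char, c0 = c →
          (if PySem.Chars.isIn [c] l then PySem.Chars.find l [c] else (l.length : Int))
            = (pre.length : Int) := by
        intro c hc
        subst hc
        rw [if_pos]
        · rw [← hsplit]
          exact pv_find_singleton_eq pre suf c0 hc0notpre hc0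
        · exact (PySem.Chars.isIn_iff_infix _ _).mpr ((List.singleton_infix_iff _ _).mpr hc0mem)
      rcases hc0acc with h | h
      · rw [heq '#' h]
        exact min_eq_left (harm '-' (fun x hx => (hpre_no x hx).2))
      · rw [heq '-' h]
        exact min_eq_right (harm '#' (fun x hx => (hpre_no x hx).1))
    rw [hstart]
    rw [PySem.List.foldl_pyRange_pyGetD' l ' ' pvStep _ (by positivity)]
    rw [Int.toNat_natCast,
        show l.drop pre.length = suf by rw [← hsplit]; exact List.drop_left]
    -- counts over the whole note equal counts over the accidental suffix
    have hcnt : ∀ c : Char, ('#' = c ∨ '-' = c) → l.count c = suf.count c := by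
      intro c hc
      rw [← hsplit, List.count_append]
      have : pre.count c = 0 := by
        rw [List.count_eq_zero]
        intro hx
        rcases hc with h | h <;> subst h
        · exact (hpre_no _ hx).1 rfl
        · exact (hpre_no _ hx).2 rfl
      omega
    have hidx := pv_noteIdx_bounds _ hmem
    rw [pv_fold_step suf _ _ hidx.1 hidx.2 (by rw [hsuf']; exact pv_suf_all l hall)]
    rw [pv_count_singleton, pv_count_singleton, hcnt '#' (Or.inl rfl), hcnt '-' (Or.inr rfl)]
    simp only [pv_mod12, pv_fdiv12, Prod.mk.injEq]
    constructor
    · omega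
    · omega
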